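-- pv_equiv track=rewrite | github.com/KarolinaPSouza/dataset-pesquisa | 1619-Restaurant_Customers/11038493.py | is_kalindrome
-- ===== SOURCE A (Python) =====
-- def is_kalindrome(arr, x, l, r):
--     while l <= r:
--         if arr[l] == arr[r]:
--             l += 1
--             r -= 1
--         else:
--             if arr[l] == x:
--                 l += 1
--             elif arr[r] == x:
--                 r -= 1
--             else:
--                 return False
--     return True
-- ===== SOURCE B (Python) =====
-- def is_kalindrome(arr, x, l, r):
--     if l > r:
--         return True
--     ys = [v for v in arr[l:r+1] if v != x]
--     return ys == ys[::-1]
-- ===== Notes on version B (the rewrite author's own statement) =====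
-- stated objective: alternative
-- what changed: Replaces the two-pointer greedy skip loop by a declarative formulation: slice out arr[l:r+1], drop every occurrence of x, and test whether the remaining list equals its reverse (the greedy skip decisions are provably equivalent to filtering x out entirely).
-- outside the precondition, e.g. on is_kalindrome([5, 7, 9], 0, -2, 1): A returns False, B returns True
import Mathlib
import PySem

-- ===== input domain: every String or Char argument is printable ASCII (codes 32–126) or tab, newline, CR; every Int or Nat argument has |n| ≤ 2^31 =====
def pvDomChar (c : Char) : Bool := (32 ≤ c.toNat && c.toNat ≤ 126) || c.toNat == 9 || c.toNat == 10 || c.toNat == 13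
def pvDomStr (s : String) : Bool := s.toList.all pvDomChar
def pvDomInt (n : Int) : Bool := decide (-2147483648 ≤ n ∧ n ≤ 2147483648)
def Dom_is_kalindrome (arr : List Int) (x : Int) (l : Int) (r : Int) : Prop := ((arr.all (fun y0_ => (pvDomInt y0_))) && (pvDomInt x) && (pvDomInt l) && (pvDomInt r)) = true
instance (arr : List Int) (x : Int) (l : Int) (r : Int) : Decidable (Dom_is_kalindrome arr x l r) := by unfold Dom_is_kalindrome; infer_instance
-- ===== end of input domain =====

-- B replaces A's two-pointer greedy skip loop by "filter x out of arr[l:r+1] and test it against its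
-- reverse" — an equivalent declarative formulation of the same cost (objective: alternative).

-- ===== PORT A =====
-- literal port of A's while-loop as recursion over the same two Int pointers; arr[i] is pyGetD
-- (valid under Pre_, where every accessed index is in range)
def is_kalindrome (arr : List Int) (x : Int) (l : Int) (r : Int) : Bool :=
  if h : l ≤ r then
    if PySem.List.pyGetD arr l 0 == PySem.List.pyGetD arr r 0 then
      is_kalindrome arr x (l + 1) (r - 1)
    else if PySem.List.pyGetD arr l 0 == x then
      is_kalindrome arr x (l + 1) r
    else if PySem.List.pyGetD arr r 0 == x then
      is_kalindrome arr x l (r - 1)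
    else false
  else true
termination_by (r - l + 1).toNat
decreasing_by all_goals omega

-- ===== PORT B =====
def is_kalindrome_alt (arr : List Int) (x : Int) (l : Int) (r : Int) : Bool :=
  if l > r then true
  else
    let ys := (PySem.List.slice arr (some l) (some (r + 1))).filter (fun v => v != x)
    ys == ys.reverse

-- ===== PRECONDITION & SPEC =====
-- Pre_ keeps the natural two-pointer domain: l > r (trivially True) or 0 ≤ l ≤/… r < len. It excludes
-- inputs with l ≤ r and an out-of-range index (A raises IndexError there) and inputs with l ≤ r and a
-- negative in-range index, where A's value comes from Python's negative-index wraparound — an artefact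
-- outside the function's natural domain that B's slice does not reproduce.
def Pre_is_kalindrome (arr : List Int) (x : Int) (l : Int) (r : Int) : Prop :=
  r < l ∨ (0 ≤ l ∧ r < (arr.length : Int))
instance (arr : List Int) (x : Int) (l : Int) (r : Int) : Decidable (Pre_is_kalindrome arr x l r) := by
  unfold Pre_is_kalindrome; infer_instance

def pvWitness_is_kalindrome : List Int × Int × Int × Int := ([3, 1, 4, 3], 4, 0, 3)

def Spec_is_kalindrome (arr : List Int) (x : Int) (l : Int) (r : Int) (out : Bool) : Prop := out = is_kalindrome_alt arr x l r
instance (arr : List Int) (x : Int) (l : Int) (r : Int) (out : Bool) : Decidable (Spec_is_kalindrome arr x l r out) := by unfold Spec_is_kalindrome; infer_instance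

-- ===== CLAIM (what is proved, stated in full; the proofs are below) =====
def Claim_equal_is_kalindrome : Prop := ∀ (arr : List Int) (x : Int) (l : Int) (r : Int), Dom_is_kalindrome arr x l r → Pre_is_kalindrome arr x l r → Spec_is_kalindrome arr x l r (is_kalindrome arr x l r)

-- ===== LEMMAS AND PROOFS =====

-- the segment arr[l : r+1] that B slices out
def pvSeg (arr : List Int) (l r : Int) : List Int := PySem.List.slice arr (some l) (some (r + 1))

lemma pvSeg_eq (arr : List Int) (l r : Int) (h0 : 0 ≤ l) (h1 : -1 ≤ r) :
    pvSeg arr l r = (arr.drop l.toNat).take ((r + 1).toNat - l.toNat) := by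
  unfold pvSeg
  exact PySem.List.slice_toNat arr h0 (by omega)

lemma pvSeg_empty (arr : List Int) (l r : Int) (h0 : 0 ≤ l) (h1 : -1 ≤ r) (h : r < l) :
    pvSeg arr l r = [] := by
  rw [pvSeg_eq arr l r h0 h1]
  have : (r + 1).toNat - l.toNat = 0 := by omega
  simp [this]

lemma pvSeg_cons (arr : List Int) (l r : Int) (h0 : 0 ≤ l) (h1 : l ≤ r)
    (h2 : r < (arr.length : Int)) (hl : l.toNat < arr.length) :
    pvSeg arr l r = arr[l.toNat] :: pvSeg arr (l + 1) r := by
  rw [pvSeg_eq arr l r h0 (by omega), pvSeg_eq arr (l + 1) r (by omega) (by omega)]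
  rw [List.drop_eq_getElem_cons hl]
  have e1 : (r + 1).toNat - l.toNat = ((r + 1).toNat - (l + 1).toNat) + 1 := by omega
  have e2 : (l + 1).toNat = l.toNat + 1 := by omega
  rw [e1, e2, List.take_succ_cons]

lemma pvSeg_snoc (arr : List Int) (l r : Int) (h0 : 0 ≤ l) (h1 : l ≤ r)
    (h2 : r < (arr.length : Int)) (hr : r.toNat < arr.length) :
    pvSeg arr l r = pvSeg arr l (r - 1) ++ [arr[r.toNat]] := by
  rw [pvSeg_eq arr l r h0 (by omega), pvSeg_eq arr l (r - 1) h0 (by omega)]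
  have e1 : (r + 1).toNat - l.toNat = (r.toNat - l.toNat) + 1 := by omega
  have e2 : (r - 1 + 1).toNat - l.toNat = r.toNat - l.toNat := by omega
  rw [e1, e2, List.take_add_one]
  have hidx : r.toNat - l.toNat < (arr.drop l.toNat).length := by
    simp [List.length_drop]; omega
  have : (arr.drop l.toNat)[r.toNat - l.toNat]? = some arr[r.toNat] := by
    rw [List.getElem?_eq_getElem hidx]
    congr 1
    rw [List.getElem_drop]
    congr 1
    omega
  rw [this]
  simp

-- B's port computed through pvSeg (valid whenever l ≤ r + 1, so the slice is the true segment)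
lemma alt_eq_pal (arr : List Int) (x l r : Int) (h0 : 0 ≤ l) (h1 : -1 ≤ r) :
    is_kalindrome_alt arr x l r =
      ((pvSeg arr l r).filter (fun v => v != x) ==
        ((pvSeg arr l r).filter (fun v => v != x)).reverse) := by
  by_cases h : l > r
  · rw [pvSeg_empty arr l r h0 h1 h]
    unfold is_kalindrome_alt
    simp [h]
  · unfold is_kalindrome_alt
    simp [h, pvSeg]

-- palindrome-test facts, phrased on the Bool equality B uses
lemma pal_sandwich (a : Int) (ys : List Int) :
    ((a :: (ys ++ [a])) == (a :: (ys ++ [a])).reverse) = (ys == ys.reverse) := by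
  simp only [List.reverse_cons, List.reverse_append, List.reverse_cons, List.reverse_nil,
    List.nil_append, List.cons_append]
  rcases eq_or_ne ys ys.reverse with hy | hy
  · rw [← hy]
    simp
  · have h2 : a :: (ys ++ [a]) ≠ a :: (ys.reverse ++ [a]) := by
      intro h
      injection h with _ h'
      apply hy
      have := congrArg List.dropLast h'
      simpa using this
    rw [beq_eq_false_iff_ne.mpr h2, beq_eq_false_iff_ne.mpr hy]

lemma pal_mismatch (a b : Int) (ys : List Int) (hab : a ≠ b) :
    ((a :: (ys ++ [b])) == (a :: (ys ++ [b])).reverse) = false := by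
  simp only [List.reverse_cons, List.reverse_append, List.reverse_cons, List.reverse_nil,
    List.nil_append, List.cons_append]
  rw [beq_eq_false_iff_ne]
  intro h
  injection h with h1 _
  exact hab h1

-- the main equivalence, by strong induction on the pointer distance
lemma A_eq_alt (n : Nat) : ∀ (arr : List Int) (x l r : Int), 0 ≤ l → r < (arr.length : Int) →
    (r - l + 1).toNat ≤ n → is_kalindrome arr x l r = is_kalindrome_alt arr x l r := by
  induction n with
  | zero =>
    intro arr x l r h0 h2 hn
    have hlr : r < l := by omega
    rw [is_kalindrome, is_kalindrome_alt]
    simp [show ¬ l ≤ r by omega, show l > r from hlr]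
  | succ n ih =>
    intro arr x l r h0 h2 hn
    by_cases hlr : l ≤ r
    · have hl : l.toNat < arr.length := by omega
      have hr : r.toNat < arr.length := by omega
      have hgl : PySem.List.pyGetD arr l 0 = arr[l.toNat] :=
        PySem.List.pyGetD_eq_getElem arr 0 h0 (by omega)
      have hgr : PySem.List.pyGetD arr r 0 = arr[r.toNat] :=
        PySem.List.pyGetD_eq_getElem arr 0 (by omega) h2
      rw [is_kalindrome]
      simp only [hlr, dite_true, hgl, hgr]
      by_cases hm : arr[l.toNat] = arr[r.toNat]
      · -- matched ends: A moves both pointers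
        simp only [hm, beq_self_eq_true, if_true]
        have e1 : (0 : Int) ≤ l + 1 := by omega
        have e2 : r - 1 < (arr.length : Int) := by omega
        have e3 : (r - 1 - (l + 1) + 1).toNat ≤ n := by omega
        rw [ih arr x (l + 1) (r - 1) e1 e2 e3]
        rw [alt_eq_pal arr x (l + 1) (r - 1) (by omega) (by omega),
            alt_eq_pal arr x l r h0 (by omega)]
        by_cases hd : l = r
        · -- singleton segment
          subst hd
          have h1 : pvSeg arr l l = [arr[l.toNat]] := by
            rw [pvSeg_cons arr l l h0 le_rfl h2 hl, pvSeg_empty arr (l + 1) l (by omega) (by omega) (by omega)]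
          have h2' : pvSeg arr (l + 1) (l - 1) = [] :=
            pvSeg_empty arr (l + 1) (l - 1) (by omega) (by omega) (by omega)
          rw [h1, h2']
          by_cases hx : arr[l.toNat] = x
          · simp [List.filter_cons, hx]
          · have hb : (arr[l.toNat] != x) = true := by simp [hx]
            simp [List.filter_cons, hb]
        · -- l < r: peel both ends
          have hlt : l < r := lt_of_le_of_ne hlr hd
          have hseg : pvSeg arr l r = arr[l.toNat] :: (pvSeg arr (l + 1) (r - 1) ++ [arr[r.toNat]]) := by
            rw [pvSeg_cons arr l r h0 hlr h2 hl,
                pvSeg_snoc arr (l + 1) r (by omega) (by omega) h2 hr]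
          rw [hseg, ← hm]
          by_cases hx : arr[l.toNat] = x
          · -- both ends are x: the filter drops them
            simp [List.filter_cons, List.filter_append, hx]
          · have hvx : (arr[l.toNat] != x) = true := by simp [hx]
            simp only [List.filter_cons, List.filter_append, List.filter_nil, hvx, if_true,
              List.append_nil]
            exact (pal_sandwich arr[l.toNat] _).symm
      · -- mismatched ends
        have hmb : (arr[l.toNat] == arr[r.toNat]) = false := by simp [hm]
        simp only [hmb, Bool.false_eq_true, if_false]
        by_cases hlx : arr[l.toNat] = x
        · -- left end is x: skip it
          simp only [hlx, beq_self_eq_true, if_true]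
          have e3 : (r - (l + 1) + 1).toNat ≤ n := by omega
          rw [ih arr x (l + 1) r (by omega) h2 e3]
          rw [alt_eq_pal arr x (l + 1) r (by omega) (by omega),
              alt_eq_pal arr x l r h0 (by omega)]
          rw [pvSeg_cons arr l r h0 hlr h2 hl, hlx]
          simp [List.filter_cons]
        · have hlxb : (arr[l.toNat] == x) = false := by simp [hlx]
          simp only [hlxb, Bool.false_eq_true, if_false]
          by_cases hrx : arr[r.toNat] = x
          · -- right end is x: skip it
            simp only [hrx, beq_self_eq_true, if_true]
            have e3 : (r - 1 - l + 1).toNat ≤ n := by omega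
            rw [ih arr x l (r - 1) h0 (by omega) e3]
            rw [alt_eq_pal arr x l (r - 1) h0 (by omega),
                alt_eq_pal arr x l r h0 (by omega)]
            rw [pvSeg_snoc arr l r h0 hlr h2 hr, hrx]
            simp [List.filter_append]
          · -- both ends survive the filter and differ: B is false too
            have hrxb : (arr[r.toNat] == x) = false := by simp [hrx]
            simp only [hrxb, Bool.false_eq_true, if_false]
            have hlt : l < r := by
              rcases lt_or_eq_of_le hlr with h | h
              · exact h
              · exact absurd (by subst h; rfl) hm
            rw [alt_eq_pal arr x l r h0 (by omega)]
            have hseg : pvSeg arr l r = arr[l.toNat] :: (pvSeg arr (l + 1) (r - 1) ++ [arr[r.toNat]]) := by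
              rw [pvSeg_cons arr l r h0 hlr h2 hl,
                  pvSeg_snoc arr (l + 1) r (by omega) (by omega) h2 hr]
            rw [hseg]
            have hvl : (arr[l.toNat] != x) = true := by simp [hlx]
            have hvr : (arr[r.toNat] != x) = true := by simp [hrx]
            simp only [List.filter_cons, List.filter_append, List.filter_nil, hvl, hvr, if_true,
              List.append_nil]
            exact (pal_mismatch arr[l.toNat] arr[r.toNat] _ hm).symm
    · rw [is_kalindrome, is_kalindrome_alt]
      simp [hlr, show l > r by omega]

-- ===== VERDICT (by name: the statement is the Claim_ definition above) =====
theorem is_kalindrome_spec : Claim_equal_is_kalindrome := by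
  intro arr x l r _ hpre
  unfold Spec_is_kalindrome
  rcases hpre with h | ⟨h0, h2⟩
  · rw [is_kalindrome, is_kalindrome_alt]
    simp [show ¬ l ≤ r by omega, show l > r from h]
  · exact A_eq_alt (r - l + 1).toNat arr x l r h0 h2 le_rfl
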